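-- pv_equiv track=rewrite | github.com/rrwt/daily-coding-challenge | daily_problems/problem_101_to_200/problem_176.py | map_chars
-- ===== SOURCE A (Python) =====
-- from collections import defaultdict
--
-- def map_chars(text_1: str, text_2: str) -> bool:
--     """
--     In case the distribution is random
--     """
--     if len(text_1) != len(text_2):
--         return False
--
--     d_1 = defaultdict(int)
--     d_2 = defaultdict(int)
--
--     for c in text_1:
--         d_1[c] += 1
--
--     for c in text_2:
--         d_2[c] += 1
--
--     values_1 = list(d_1.values())
--     values_2 = list(d_2.values())
--
--     for index, value in enumerate(values_1):
--         for index_2, value_2 in enumerate(values_2):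
--             if value == value_2:
--                 values_1[index] = -1
--                 values_2[index_2] = -1
--                 break
--         else:
--             return False
--
--     for index, value in enumerate(values_2):
--         if value != -1:
--             return False
--
--     return True
-- ===== SOURCE B (Python) =====
-- def map_chars(text_1: str, text_2: str) -> bool:
--     counts_1 = {}
--     for c in text_1:
--         counts_1[c] = counts_1.get(c, 0) + 1
--     counts_2 = {}
--     for c in text_2:
--         counts_2[c] = counts_2.get(c, 0) + 1
--     return sorted(counts_1.values()) == sorted(counts_2.values())
-- ===== Notes on version B (the rewrite author's own statement) =====
-- stated objective: simpler
-- what changed: Replaced A's length guard plus O(k^2) nested greedy -1-marking matcher over the two count lists by sorting both count-value lists once and comparing them for equality (equal count multisets already force equal lengths).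
import Mathlib
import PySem

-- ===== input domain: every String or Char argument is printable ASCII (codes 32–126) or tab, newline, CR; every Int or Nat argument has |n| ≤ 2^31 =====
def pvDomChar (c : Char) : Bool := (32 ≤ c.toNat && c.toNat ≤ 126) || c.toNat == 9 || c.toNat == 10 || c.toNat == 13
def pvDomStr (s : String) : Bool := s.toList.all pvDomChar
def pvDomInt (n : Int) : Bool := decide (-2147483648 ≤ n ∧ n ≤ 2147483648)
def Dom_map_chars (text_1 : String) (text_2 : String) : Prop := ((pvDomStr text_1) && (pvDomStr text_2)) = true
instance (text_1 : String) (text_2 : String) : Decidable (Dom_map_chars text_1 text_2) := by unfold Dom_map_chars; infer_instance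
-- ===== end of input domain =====

-- B replaces A's nested greedy -1-marking matcher by sorting both count-value lists and
-- comparing them (the length guard is redundant: equal count multisets force equal lengths);
-- objective: simpler.

-- ===== PORT A =====
-- inner loop: scan values_2 for the first entry equal to value, mark it -1 (none = no match → 'else: return False')
def pvMarkFirst (value : Int) : List Int → Option (List Int)
  | [] => none
  | value_2 :: rest =>
      if value = value_2 then some ((-1) :: rest)
      else (pvMarkFirst value rest).map (value_2 :: ·)

-- outer loop over values_1 (A also writes -1 into values_1[index], but that entry is never read again)
def pvMarkAll : List Int → List Int → Option (List Int)
  | [], values_2 => some values_2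
  | value :: rest, values_2 =>
      match pvMarkFirst value values_2 with
      | none => none
      | some values_2' => pvMarkAll rest values_2'

def map_chars (text_1 : String) (text_2 : String) : Bool :=
  if PySem.Str.len text_1 ≠ PySem.Str.len text_2 then false
  else
    let d_1 := text_1.toList.foldl (fun d c => d.modify c 0 (· + 1)) (PySem.Dict.empty : PySem.Dict Char Int)
    let d_2 := text_2.toList.foldl (fun d c => d.modify c 0 (· + 1)) (PySem.Dict.empty : PySem.Dict Char Int)
    match pvMarkAll d_1.values d_2.values with
    | none => false
    | some values_2 => values_2.all (fun value => value == -1)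

-- ===== PORT B =====
def map_chars_alt (text_1 : String) (text_2 : String) : Bool :=
  let counts_1 := text_1.toList.foldl (fun d c => d.insert c (d.getD c 0 + 1)) (PySem.Dict.empty : PySem.Dict Char Int)
  let counts_2 := text_2.toList.foldl (fun d c => d.insert c (d.getD c 0 + 1)) (PySem.Dict.empty : PySem.Dict Char Int)
  PySem.List.sorted counts_1.values (fun v => v) false
    == PySem.List.sorted counts_2.values (fun v => v) false

-- ===== PRECONDITION & SPEC =====
def Spec_map_chars (text_1 : String) (text_2 : String) (out : Bool) : Prop := out = map_chars_alt text_1 text_2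
instance (text_1 : String) (text_2 : String) (out : Bool) : Decidable (Spec_map_chars text_1 text_2 out) := by unfold Spec_map_chars; infer_instance

-- ===== CLAIM (what is proved, stated in full; the proofs are below) =====
def Claim_equal_map_chars : Prop := ∀ (text_1 : String) (text_2 : String), Dom_map_chars text_1 text_2 → Spec_map_chars text_1 text_2 (map_chars text_1 text_2)

-- ===== LEMMAS AND PROOFS =====

-- the count-value list of the counter built from l
def pvVals (l : List Char) : List Int :=
  (PySem.Set.ofList l).map (fun k => (List.count k l : Int))

theorem vals_of_counter (l : List Char) :
    (l.foldl (fun d c => d.modify c 0 (· + 1)) (PySem.Dict.empty : PySem.Dict Char Int)).values = pvVals l := by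
  rw [← PySem.Dict.counter_eq_foldl]
  simp only [PySem.Dict.values, PySem.Dict.items_counter, List.map_map]
  rfl

theorem vals_pos (l : List Char) : ∀ v ∈ pvVals l, 1 ≤ v := by
  intro v hv
  simp only [pvVals, List.mem_map] at hv
  obtain ⟨k, hk, rfl⟩ := hv
  have : k ∈ l := (PySem.Set.mem_ofList l k).mp hk
  have := List.count_pos_iff.mpr this
  exact_mod_cast this

theorem vals_sum (l : List Char) : (pvVals l).sum = (l.length : Int) := by
  have hn : (PySem.Set.ofList l).Nodup := PySem.Set.nodup_ofList l
  have hfin : (PySem.Set.ofList l).toFinset = l.toFinset := by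
    ext x; simp [PySem.Set.mem_ofList]
  have h1 : ((PySem.Set.ofList l).map (fun k => List.count k l)).sum = l.length := by
    rw [← List.sum_toFinset _ hn, hfin]
    exact List.sum_toFinset_count_eq_length l
  have h2 := congrArg (fun n : ℕ => (n : Int)) h1
  simp only [Nat.cast_list_sum, List.map_map] at h2
  simpa [pvVals, Function.comp] using h2

theorem vals_of_counter' (l : List Char) :
    (l.foldl (fun d c => d.insert c (d.getD c 0 + 1)) (PySem.Dict.empty : PySem.Dict Char Int)).values = pvVals l := by
  rw [PySem.Dict.foldl_insert_getD_add_one_eq_counter, PySem.Dict.counter_eq_foldl,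
      vals_of_counter]

theorem markFirst_none {v : Int} {l : List Int} : pvMarkFirst v l = none ↔ v ∉ l := by
  induction l with
  | nil => simp [pvMarkFirst]
  | cons x xs ih =>
    by_cases h : v = x
    · simp [pvMarkFirst, h]
    · simp [pvMarkFirst, h, Option.map_eq_none_iff, ih]

theorem markFirst_some {v : Int} {l l' : List Int} (hv : v ≠ -1)
    (h : pvMarkFirst v l = some l') :
    l'.filter (fun x => x ≠ -1) = (l.filter (fun x => x ≠ -1)).erase v := by
  induction l generalizing l' with
  | nil => simp [pvMarkFirst] at h
  | cons x xs ih =>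
    simp only [pvMarkFirst] at h
    split_ifs at h with hx
    · cases h
      subst hx
      simp [hv]
    · obtain ⟨l'', hl'', rfl⟩ := Option.map_eq_some_iff.mp h
      by_cases hx1 : x = -1
      · subst hx1
        simpa using ih hl''
      · have hxv : (x == v) = false := by
          simp only [beq_eq_false_iff_ne, ne_eq]
          exact fun e => hx e.symm
        simp only [List.filter_cons]
        simp only [show (decide (x ≠ -1)) = true by simp [hx1], if_true]
        simp only [List.erase_cons, hxv]
        simpa using ih hl''

theorem markAll_spec (vs : List Int) (hvs : ∀ v ∈ vs, v ≠ -1) (l : List Int) :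
    (match pvMarkAll vs l with
     | none => false
     | some r => r.all (fun value => value == -1))
      = decide (vs.Perm (l.filter (fun x => x ≠ -1))) := by
  induction vs generalizing l with
  | nil =>
    simp only [pvMarkAll]
    rw [Bool.eq_iff_iff]
    simp [List.all_eq_true, List.nil_perm, List.filter_eq_nil_iff]
  | cons v vs ih =>
    have hv : v ≠ -1 := hvs v (by simp)
    have hvs' : ∀ w ∈ vs, w ≠ -1 := fun w hw => hvs w (by simp [hw])
    simp only [pvMarkAll]
    cases h : pvMarkFirst v l with
    | none =>
      have hnm : v ∉ l := markFirst_none.mp h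
      rw [Bool.eq_iff_iff]
      simp only [decide_eq_true_eq]
      constructor
      · intro hc; cases hc
      · intro hp
        exact absurd (List.mem_of_mem_filter (hp.subset (by simp))) hnm
    | some l' =>
      have hmem : v ∈ l := by
        by_contra hc
        rw [← markFirst_none] at hc
        rw [h] at hc; cases hc
      have hvf : v ∈ l.filter (fun x => x ≠ -1) := by
        simp [List.mem_filter, hmem, hv]
      rw [ih hvs' l', markFirst_some hv h, Bool.eq_iff_iff]
      simp only [decide_eq_true_eq]
      rw [List.cons_perm_iff_perm_erase]
      tauto

-- ===== VERDICT (by name: the statement is the Claim_ definition above) =====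
theorem map_chars_spec : Claim_equal_map_chars := by
  intro t1 t2 _
  unfold Spec_map_chars map_chars map_chars_alt
  simp only [vals_of_counter, vals_of_counter', PySem.Str.len_eq]
  have hpos1 := vals_pos t1.toList
  have hpos2 := vals_pos t2.toList
  have hne2 : ∀ v ∈ pvVals t2.toList, v ≠ -1 := fun v hv => by
    have := hpos2 v hv; omega
  have hfilt : (pvVals t2.toList).filter (fun x => x ≠ -1) = pvVals t2.toList := by
    rw [List.filter_eq_self]
    intro a ha; simpa using hne2 a ha
  rw [markAll_spec _ (fun v hv => by have := hpos1 v hv; omega), hfilt]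
  have hsort : ((PySem.List.sorted (pvVals t1.toList) (fun v => v) false
      == PySem.List.sorted (pvVals t2.toList) (fun v => v) false))
      = decide ((pvVals t1.toList).Perm (pvVals t2.toList)) := by
    rw [Bool.eq_iff_iff]
    simp only [beq_iff_eq, decide_eq_true_eq]
    exact PySem.List.sorted_id_eq_sorted_id_iff_perm _ _
  rw [hsort]
  split_ifs with hlen
  · rw [Bool.eq_iff_iff]
    simp only [decide_eq_true_eq, Bool.false_eq_true, false_iff]
    intro hp
    apply hlen
    have := hp.sum_eq
    rw [vals_sum, vals_sum] at this
    exact this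
  · rfl
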